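-- pv_equiv track=rewrite | github.com/Rachel-3/2024-Algorithm-Study | dohyeon/Programmers/Level_0/Lv0_코드_처리하기.py | solution
-- ===== SOURCE A (Python) =====
-- def solution(code):
--     answer = ''
--     mode = 0
--     for index, value in enumerate(code) :
--         if mode == 0 :
--             if value == "1" :
--                 mode = 1
--             elif index % 2 == 0 :
--                 answer += value
--         elif mode == 1 :
--             if value == "1" :
--                 mode = 0
--             elif index % 2 == 1 :
--                 answer += value
--     if answer == "" :
--         return "EMPTY"
--     return answer
-- ===== SOURCE B (Python) =====
-- def solution(code):
--     # Pass 1: prefix parity of '1' characters -> the mode in effect before each index.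
--     modes = []
--     m = 0
--     for ch in code:
--         modes.append(m)
--         if ch == '1':
--             m = 1 - m
--     # Pass 2: keep the characters whose index parity matches the pre-position mode.
--     res = ''.join(ch for i, (ch, m) in enumerate(zip(code, modes))
--                   if ch != '1' and i % 2 == m)
--     return res or 'EMPTY'
-- ===== Notes on version B (the rewrite author's own statement) =====
-- stated objective: alternative
-- what changed: Replaces the single stateful loop (mode machine with branching appends) by a two-pass decomposition: first a prefix-parity scan recording the mode in effect before each index, then one filtering join selecting characters whose index parity matches that pre-position mode.
import Mathlib
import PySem

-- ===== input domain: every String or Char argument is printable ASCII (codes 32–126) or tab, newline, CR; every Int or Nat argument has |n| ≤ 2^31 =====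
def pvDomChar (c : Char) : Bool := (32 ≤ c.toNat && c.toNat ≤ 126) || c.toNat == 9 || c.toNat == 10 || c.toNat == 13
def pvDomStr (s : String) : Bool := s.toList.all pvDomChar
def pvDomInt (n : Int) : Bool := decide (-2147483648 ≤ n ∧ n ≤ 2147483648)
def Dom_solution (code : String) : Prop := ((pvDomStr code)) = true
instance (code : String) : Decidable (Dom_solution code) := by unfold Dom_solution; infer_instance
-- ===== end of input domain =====

-- B replaces A's single stateful mode-machine loop by a two-pass decomposition
-- (prefix-parity scan, then one filtering join); equivalence is proved on all inputs.

-- ===== PORT A =====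
-- the body of A's for-loop, as a named step for the fold (branches in source order)
def pvStepA (st : String × Int) (iv : Int × Char) : String × Int :=
  if st.2 = 0 then
    if iv.2 = '1' then (st.1, 1)
    else if PySem.Int.mod iv.1 2 = 0 then (st.1.push iv.2, st.2)
    else st
  else if st.2 = 1 then
    if iv.2 = '1' then (st.1, 0)
    else if PySem.Int.mod iv.1 2 = 1 then (st.1.push iv.2, st.2)
    else st
  else st

def solution (code : String) : String :=
  let st := (PySem.List.enumerate code.toList 0).foldl pvStepA ("", (0 : Int))
  if st.1 = "" then "EMPTY" else st.1

-- ===== PORT B =====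
-- pass 1 of Source B: the modes list built by a fold (append current mode, toggle on '1')
def pvStepB (acc : List Int × Int) (ch : Char) : List Int × Int :=
  (acc.1 ++ [acc.2], if ch = '1' then 1 - acc.2 else acc.2)

def solution_alt (code : String) : String :=
  let cs := code.toList
  let modes := (cs.foldl pvStepB ([], (0 : Int))).1
  -- pass 2 of Source B: the filtering join over enumerate(zip(code, modes))
  let res := String.ofList (((PySem.List.enumerate (cs.zip modes) 0).filter
      (fun p => p.2.1 ≠ '1' ∧ PySem.Int.mod p.1 2 = p.2.2)).map (fun p => p.2.1))
  if res = "" then "EMPTY" else res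

-- ===== PRECONDITION & SPEC =====
def Spec_solution (code : String) (out : String) : Prop := out = solution_alt code
instance (code : String) (out : String) : Decidable (Spec_solution code out) := by unfold Spec_solution; infer_instance

-- ===== CLAIM (what is proved, stated in full; the proofs are below) =====
def Claim_equal_solution : Prop := ∀ (code : String), Dom_solution code → Spec_solution code (solution code)

-- ===== LEMMAS AND PROOFS =====

-- the characters both programs select, as one recursion (i = current index, m = current mode)
def pvSelect : List Char → Int → Int → List Char
  | [], _, _ => []
  | c :: rest, i, m =>
    if c = '1' then pvSelect rest (i + 1) (1 - m)
    else if i % 2 = m then c :: pvSelect rest (i + 1) m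
    else pvSelect rest (i + 1) m

-- the modes list B's first pass produces, recursively
def pvModes : List Char → Int → List Int
  | [], _ => []
  | c :: rest, m => m :: pvModes rest (if c = '1' then 1 - m else m)

theorem pvModes_fold : ∀ (cs : List Char) (acc : List Int) (m : Int),
    (cs.foldl pvStepB (acc, m)).1 = acc ++ pvModes cs m := by
  intro cs
  induction cs with
  | nil => intro acc m; simp [pvModes]
  | cons c rest ih => intro acc m; simp [pvStepB, pvModes, ih]

theorem pvEmpty_ofList : ("" : String) = String.ofList [] := by
  rw [← String.toList_inj]

theorem pvFilter_eq_select : ∀ (cs : List Char) (i m : Int),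
    ((PySem.List.enumerate (cs.zip (pvModes cs m)) i).filter
        (fun p => p.2.1 ≠ '1' ∧ PySem.Int.mod p.1 2 = p.2.2)).map (fun p => p.2.1)
      = pvSelect cs i m := by
  intro cs
  induction cs with
  | nil => intro i m; simp [pvModes, pvSelect, PySem.List.enumerate_nil]
  | cons c rest ih =>
    intro i m
    by_cases h1 : c = '1'
    · have h := ih (i + 1) (1 - m)
      simpa [pvModes, pvSelect, PySem.List.enumerate_cons, List.filter_cons, h1] using h
    · by_cases h2 : i % 2 = m
      · have h := ih (i + 1) m
        simpa [pvModes, pvSelect, PySem.List.enumerate_cons, List.filter_cons, h1, h2] using h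
      · have h := ih (i + 1) m
        simpa [pvModes, pvSelect, PySem.List.enumerate_cons, List.filter_cons, h1, h2] using h

theorem pvLoopA_eq : ∀ (cs : List Char) (i : Int) (ans : List Char) (m : Int),
    m = 0 ∨ m = 1 →
    ((PySem.List.enumerate cs i).foldl pvStepA (String.ofList ans, m)).1
      = String.ofList (ans ++ pvSelect cs i m) := by
  intro cs
  induction cs with
  | nil => intro i ans m _; simp [pvSelect, PySem.List.enumerate_nil]
  | cons c rest ih =>
    intro i ans m hm
    rcases hm with hm | hm <;> subst hm
    · by_cases h1 : c = '1'
      · have h := ih (i + 1) ans 1 (Or.inr rfl)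
        simpa [PySem.List.enumerate_cons, pvStepA, pvSelect, h1] using h
      · by_cases h2 : (2 : ℤ) ∣ i
        · have h := ih (i + 1) (ans ++ [c]) 0 (Or.inl rfl)
          simpa [PySem.List.enumerate_cons, pvStepA, pvSelect, h1, h2, List.append_assoc,
                 Int.emod_emod_of_dvd] using h
        · have h := ih (i + 1) ans 0 (Or.inl rfl)
          simpa [PySem.List.enumerate_cons, pvStepA, pvSelect, h1, h2] using h
    · by_cases h1 : c = '1'
      · have h := ih (i + 1) ans 0 (Or.inl rfl)
        simpa [PySem.List.enumerate_cons, pvStepA, pvSelect, h1] using h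
      · by_cases h2 : i % 2 = 1
        · have h := ih (i + 1) (ans ++ [c]) 1 (Or.inr rfl)
          simpa [PySem.List.enumerate_cons, pvStepA, pvSelect, h1, h2, List.append_assoc] using h
        · have h := ih (i + 1) ans 1 (Or.inr rfl)
          simpa [PySem.List.enumerate_cons, pvStepA, pvSelect, h1, h2] using h

-- ===== VERDICT (by name: the statement is the Claim_ definition above) =====
theorem solution_spec : Claim_equal_solution := by
  intro code _
  unfold Spec_solution
  simp only [solution, solution_alt]
  rw [pvModes_fold code.toList [] 0, List.nil_append,
      pvFilter_eq_select code.toList 0 0, pvEmpty_ofList,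
      pvLoopA_eq code.toList 0 [] 0 (Or.inl rfl), List.nil_append]
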